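-- pv_equiv track=rewrite | github.com/datajoint-company/adamacs | adamacs/ingest/behavior.py | prepare_timestamps
-- ===== SOURCE A (Python) =====
-- def prepare_timestamps(ts, session_key, event_type):
--     """Prepares timestamps for insert with datajoint"""
--     ts_shutter_chan_start = ts[0::2]
--     ts_shutter_chan_stop = ts[1::2]
--
--     to_insert = [list(ts_shutter_chan_start), list(ts_shutter_chan_stop)]
--     to_insert = [[session_key, event_type, *i] for i in zip(*to_insert)]  # transposes the list to get rows/cols right
--     if len(to_insert) != len(ts_shutter_chan_start):
--         to_insert.append([session_key, event_type, ts_shutter_chan_start[-1], ''])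
--
--     return to_insert
-- ===== SOURCE B (Python) =====
-- def prepare_timestamps(ts, session_key, event_type):
--     """Prepares timestamps for insert with datajoint"""
--     # Single pass with a pending-pair buffer: flush a row whenever the buffer
--     # holds a start/stop pair; a leftover unpaired start gets an empty stop.
--     rows = []
--     pair = []
--     for t in ts:
--         pair.append(t)
--         if len(pair) == 2:
--             rows.append([session_key, event_type, pair[0], pair[1]])
--             pair = []
--     if pair:
--         rows.append([session_key, event_type, pair[0], ''])
--     return rows
-- ===== Notes on version B (the rewrite author's own statement) =====
-- stated objective: simpler
-- what changed: Replaces A's two stride-2 slices, list-of-columns build, zip(*...) transpose and after-the-fact length-mismatch patch with a single pass over the timestamps using a pending-pair buffer that flushes a row per pair and emits a leftover start with an empty stop field.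
import Mathlib
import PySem

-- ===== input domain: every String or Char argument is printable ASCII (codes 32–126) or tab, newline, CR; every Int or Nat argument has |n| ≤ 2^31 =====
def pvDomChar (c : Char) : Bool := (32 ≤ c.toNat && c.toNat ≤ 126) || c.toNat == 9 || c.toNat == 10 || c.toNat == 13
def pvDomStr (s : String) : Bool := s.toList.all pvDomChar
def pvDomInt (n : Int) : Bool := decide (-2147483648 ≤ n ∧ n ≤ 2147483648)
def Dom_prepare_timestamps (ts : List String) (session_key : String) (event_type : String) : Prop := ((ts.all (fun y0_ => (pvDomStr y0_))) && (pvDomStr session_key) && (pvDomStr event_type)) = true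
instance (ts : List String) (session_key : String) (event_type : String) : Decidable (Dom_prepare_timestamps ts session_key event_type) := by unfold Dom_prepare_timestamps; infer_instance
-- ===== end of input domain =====

-- ===== PORT A =====
-- B changes A's slice/zip-transpose/length-patch build into a direct pairwise recursion (objective: simpler).
-- pvStride2 xs = xs[0::2]; hand port of the stride-2 slice (start 0, no stop, step 2: exact — it
-- selects indices 0,2,4,… and never raises); ts[1::2] is then pvStride2 ts.tail.
def pvStride2 : List String → List String
  | [] => []
  | [a] => [a]
  | a :: _ :: r => a :: pvStride2 r

def prepare_timestamps (ts : List String) (session_key : String) (event_type : String) : List (List String) :=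
  let ts_shutter_chan_start := pvStride2 ts          -- ts[0::2]
  let ts_shutter_chan_stop := pvStride2 ts.tail      -- ts[1::2]
  -- [[session_key, event_type, *i] for i in zip(*[list(start), list(stop)])]
  let to_insert := (ts_shutter_chan_start.zip ts_shutter_chan_stop).map
    (fun i => [session_key, event_type, i.1, i.2])
  if to_insert.length ≠ ts_shutter_chan_start.length then
    -- to_insert.append([session_key, event_type, ts_shutter_chan_start[-1], ''])
    -- (the branch is reachable only with a nonempty start list, so start[-1] never raises)
    to_insert ++ [[session_key, event_type, PySem.List.pyGetD ts_shutter_chan_start (-1) "", ""]]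
  else to_insert

-- ===== PORT B =====
def prepare_timestamps_alt (ts : List String) (session_key : String) (event_type : String) : List (List String) :=
  -- single pass with a pending-pair buffer (state = (rows, pair)), then flush the leftover
  let st := ts.foldl
    (fun (st : List (List String) × List String) (t : String) =>
      let pair := st.2 ++ [t]
      if pair.length = 2 then
        (st.1 ++ [[session_key, event_type,
          PySem.List.pyGetD pair 0 "", PySem.List.pyGetD pair 1 ""]], ([] : List String))
      else (st.1, pair))
    ([], [])
  if st.2 ≠ [] then
    st.1 ++ [[session_key, event_type, PySem.List.pyGetD st.2 0 "", ""]]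
  else st.1

-- ===== PRECONDITION & SPEC =====
def Spec_prepare_timestamps (ts : List String) (session_key : String) (event_type : String) (out : List (List String)) : Prop := out = prepare_timestamps_alt ts session_key event_type
instance (ts : List String) (session_key : String) (event_type : String) (out : List (List String)) : Decidable (Spec_prepare_timestamps ts session_key event_type out) := by unfold Spec_prepare_timestamps; infer_instance

-- ===== CLAIM (what is proved, stated in full; the proofs are below) =====
def Claim_equal_prepare_timestamps : Prop := ∀ (ts : List String) (session_key : String) (event_type : String), Dom_prepare_timestamps ts session_key event_type → Spec_prepare_timestamps ts session_key event_type (prepare_timestamps ts session_key event_type)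

-- ===== LEMMAS AND PROOFS =====
-- proof-only helper: the pairwise recursion both ports are reduced to
def pvPairRec (session_key event_type : String) : List String → List (List String)
  | [] => []
  | [a] => [[session_key, event_type, a, ""]]
  | a :: b :: r => [session_key, event_type, a, b] :: pvPairRec session_key event_type r

theorem pyGetD_neg_one_cons (x y : String) (s : List String) :
    PySem.List.pyGetD (x :: y :: s) (-1) "" = PySem.List.pyGetD (y :: s) (-1) "" := by
  simp [PySem.List.pyGetD, PySem.List.pyGet?, PySem.List.pyIdx?]
  rfl

theorem pvStride2_cons_tail (b : String) (r : List String) :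
    pvStride2 (b :: r) = b :: pvStride2 r.tail := by
  cases r <;> rfl

theorem prepare_timestamps_eq_pairRec (ts : List String) (session_key event_type : String) :
    prepare_timestamps ts session_key event_type
      = pvPairRec session_key event_type ts := by
  induction ts using pvPairRec.induct with
  | case1 => rfl
  | case2 a => rfl
  | case3 a b r ih =>
    simp only [prepare_timestamps, pvPairRec, pvStride2, List.tail_cons,
      pvStride2_cons_tail, List.zip_cons_cons, List.map_cons, List.length_cons,
      List.length_map] at ih ⊢
    by_cases h : ((pvStride2 r).zip (pvStride2 r.tail)).length = (pvStride2 r).length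
    · rw [if_neg (by omega)] at ih
      rw [if_neg (by omega), ih]
    · have hr : r ≠ [] := by
        rintro rfl; exact h rfl
      have hne : pvStride2 r ≠ [] := by
        cases r with
        | nil => exact absurd rfl hr
        | cons c r' => rw [pvStride2_cons_tail]; exact List.cons_ne_nil _ _
      have hget : PySem.List.pyGetD
          (a :: pvStride2 r) (-1) ""
          = PySem.List.pyGetD (pvStride2 r) (-1) "" := by
        obtain ⟨c, s, hs⟩ := List.exists_cons_of_ne_nil hne
        rw [hs]; exact pyGetD_neg_one_cons a c s
      simp only [hget]
      rw [if_pos (by omega)] at ih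
      rw [if_pos (by omega), List.cons_append, ih]

theorem alt_foldl_inv (session_key event_type : String) (r : List String)
    (rows : List (List String)) :
    (let st := r.foldl
      (fun (st : List (List String) × List String) (t : String) =>
        let pair := st.2 ++ [t]
        if pair.length = 2 then
          (st.1 ++ [[session_key, event_type,
            PySem.List.pyGetD pair 0 "", PySem.List.pyGetD pair 1 ""]], ([] : List String))
        else (st.1, pair))
      (rows, [])
     if st.2 ≠ [] then
       st.1 ++ [[session_key, event_type, PySem.List.pyGetD st.2 0 "", ""]]
     else st.1)
      = rows ++ pvPairRec session_key event_type r := by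
  induction r using pvPairRec.induct generalizing rows with
  | case1 => simp [pvPairRec]
  | case2 a => simp [pvPairRec, PySem.List.pyGetD, PySem.List.pyGet?, PySem.List.pyIdx?]
  | case3 a b r ih =>
    have hga : PySem.List.pyGetD ([a, b] : List String) 0 "" = a := by
      simp [PySem.List.pyGetD, PySem.List.pyGet?, PySem.List.pyIdx?]
    have hgb : PySem.List.pyGetD ([a, b] : List String) 1 "" = b := by
      simp [PySem.List.pyGetD, PySem.List.pyGet?, PySem.List.pyIdx?]
    have h := ih (rows ++ [[session_key, event_type, a, b]])
    simp only [List.foldl_cons, List.nil_append, List.cons_append, List.length_cons,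
      List.length_nil, Nat.reduceEqDiff, if_true, if_false,
      reduceCtorEq, hga, hgb, pvPairRec] at h ⊢
    norm_num at h ⊢
    rw [h]

theorem prepare_timestamps_alt_eq_pairRec (ts : List String) (session_key event_type : String) :
    prepare_timestamps_alt ts session_key event_type
      = pvPairRec session_key event_type ts := by
  have h := alt_foldl_inv session_key event_type ts []
  simpa [prepare_timestamps_alt] using h

-- ===== VERDICT (by name: the statement is the Claim_ definition above) =====
theorem prepare_timestamps_spec : Claim_equal_prepare_timestamps := by
  intro ts sk et _
  unfold Spec_prepare_timestamps
  rw [prepare_timestamps_eq_pairRec, prepare_timestamps_alt_eq_pairRec]
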